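-- pv_equiv track=rewrite | github.com/komajun365/competitive_programming | arc/arc110/e/test.py | solve_simple
-- ===== SOURCE A (Python) =====
-- def solve_simple(n,s):
--     make = [set() for _ in range(n+1)]
--     make[n].add(s)
--
--     keys = ['AB', 'AC', 'BA', 'BC', 'CA', 'CB']
--     vals = 'CBCABA'
--     d = dict()
--     for k,v in zip(keys, vals):
--         d[k] = v
--
--     for i in range(n,1,-1):
--         for t in make[i]:
--             for j in range(i-1):
--                 cut = t[j:j+2]
--                 if cut in d:
--                     tmp = t[:j] + d[cut] + t[j+2:]
--                     make[i-1].add(tmp)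
--
--     ans = 0
--     for i in range(1,n+1):
--         ans += len(make[i])
--
--     return ans,make
-- ===== SOURCE B (Python) =====
-- def solve_simple(n, s):
--     d = {'AB': 'C', 'AC': 'B', 'BA': 'C', 'BC': 'A', 'CA': 'B', 'CB': 'A'}
--     make = [set() for _ in range(n + 1)]
--
--     def explore(t, i):
--         if t in make[i]:
--             return
--         make[i].add(t)
--         if i <= 1:
--             return
--         for j in range(i - 1):
--             cut = t[j:j + 2]
--             if cut in d:
--                 explore(t[:j] + d[cut] + t[j + 2:], i - 1)
--
--     explore(s, n)
--     ans = sum(len(make[i]) for i in range(1, n + 1))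
--     return ans, make
-- ===== Notes on version B (the rewrite author's own statement) =====
-- stated objective: alternative
-- what changed: The level-by-level BFS loop over a preallocated array of per-length sets is replaced by a recursive DFS helper explore(t, i) that marks t in make[i] and immediately recurses into each rewrite of t at level i-1, with the per-level sets doubling as the visited structure.
import Mathlib
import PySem

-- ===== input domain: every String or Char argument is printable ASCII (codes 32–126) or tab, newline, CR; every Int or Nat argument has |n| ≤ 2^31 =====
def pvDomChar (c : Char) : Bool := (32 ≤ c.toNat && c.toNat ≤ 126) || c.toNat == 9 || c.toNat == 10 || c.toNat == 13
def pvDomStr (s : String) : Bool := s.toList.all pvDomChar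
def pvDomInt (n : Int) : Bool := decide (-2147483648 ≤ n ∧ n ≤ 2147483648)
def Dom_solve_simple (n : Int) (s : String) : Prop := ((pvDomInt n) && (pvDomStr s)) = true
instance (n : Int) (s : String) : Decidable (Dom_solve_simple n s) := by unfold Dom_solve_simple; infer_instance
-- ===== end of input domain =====

-- B replaces the level-by-level BFS over the preallocated array of sets by a recursive DFS
-- (explicit `explore` with a per-level visited set); same exact result, objective: alternative.

-- ===== PORT A =====
-- d = dict built from zip(keys, vals) as in A; a 1-character Python str is a singleton List Char
def pvDictA : PySem.Dict (List Char) (List Char) :=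
  (List.zip ["AB".toList, "AC".toList, "BA".toList, "BC".toList, "CA".toList, "CB".toList]
            ("CBCABA".toList.map (fun c => [c]))).foldl
    (fun d kv => d.insert kv.1 kv.2) PySem.Dict.empty

def solve_simple (n : Int) (s : String) : Int × List (List String) :=
  -- make = [set() for _ in range(n+1)]; make[n].add(s)  (n < 0 raises IndexError in Python: outside Pre_)
  let make0 : List (PySem.Set (List Char)) := (List.range (n + 1).toNat).map (fun _ => PySem.Set.empty)
  let make1 := PySem.List.pySetD make0 n
      (PySem.Set.add (PySem.List.pyGetD make0 n PySem.Set.empty) s.toList)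
  -- for i in range(n,1,-1): for t in make[i]: for j in range(i-1): …
  let make2 := (PySem.List.pyRange n 1 (-1)).foldl (fun mk i =>
      (PySem.List.pyGetD mk i PySem.Set.empty).foldl (fun mk t =>
        (PySem.List.pyRange 0 (i - 1) 1).foldl (fun mk j =>
          let cut := PySem.List.slice t (some j) (some (j + 2))
          match pvDictA.get? cut with          -- 'if cut in d: … d[cut] …'
          | some v => PySem.List.pySetD mk (i - 1)
              (PySem.Set.add (PySem.List.pyGetD mk (i - 1) PySem.Set.empty)
                (PySem.List.slice t none (some j) ++ v ++ PySem.List.slice t (some (j + 2)) none))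
          | none => mk) mk) mk) make1
  -- ans = 0; for i in range(1,n+1): ans += len(make[i])
  let ans := (PySem.List.pyRange 1 (n + 1) 1).foldl
      (fun a i => a + ((PySem.List.pyGetD make2 i PySem.Set.empty).length : Int)) 0
  (ans, make2.map (fun st => st.map String.ofList))

-- ===== PORT B =====
def pvDictB : PySem.Dict (List Char) (List Char) :=
  PySem.Dict.ofList [("AB".toList, "C".toList), ("AC".toList, "B".toList), ("BA".toList, "C".toList),
                     ("BC".toList, "A".toList), ("CA".toList, "B".toList), ("CB".toList, "A".toList)]

-- def explore(t, i): DFS with the per-level visited set make[i]; the level i is a Nat (Source B is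
-- called with i = n ≥ 0 under Pre_ and only ever decrements while 2 ≤ i); `match lev with 0|1` is 'if i <= 1'
def pvExplore (t : List Char) (lev : Nat) (make : List (PySem.Set (List Char))) :
    List (PySem.Set (List Char)) :=
  if PySem.Set.contains (PySem.List.pyGetD make (lev : Int) PySem.Set.empty) t then make
  else
    let make1 := PySem.List.pySetD make (lev : Int)
        (PySem.Set.add (PySem.List.pyGetD make (lev : Int) PySem.Set.empty) t)
    match lev with
    | 0 => make1
    | 1 => make1
    | (k + 2) =>
      (PySem.List.pyRange 0 ((k : Int) + 1) 1).foldl (fun mk j =>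
        let cut := PySem.List.slice t (some j) (some (j + 2))
        match pvDictB.get? cut with
        | some v => pvExplore
            (PySem.List.slice t none (some j) ++ v ++ PySem.List.slice t (some (j + 2)) none)
            (k + 1) mk
        | none => mk) make1
termination_by lev

def solve_simple_alt (n : Int) (s : String) : Int × List (List String) :=
  let make0 : List (PySem.Set (List Char)) := (List.range (n + 1).toNat).map (fun _ => PySem.Set.empty)
  let make := pvExplore s.toList n.toNat make0
  let ans := ((PySem.List.pyRange 1 (n + 1) 1).map
      (fun i => ((PySem.List.pyGetD make i PySem.Set.empty).length : Int))).sum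
  (ans, make.map (fun st => st.map String.ofList))

-- ===== PRECONDITION & SPEC =====
-- Python A raises IndexError (make[n] on a list of max(0,n+1) sets) exactly when n < 0.
def Pre_solve_simple (n : Int) (s : String) : Prop := 0 ≤ n
instance (n : Int) (s : String) : Decidable (Pre_solve_simple n s) := by
  unfold Pre_solve_simple; infer_instance
def pvWitness_solve_simple : Int × String := (2, "AB")

def Spec_solve_simple (n : Int) (s : String) (out : Int × List (List String)) : Prop :=
  out = solve_simple_alt n s
instance (n : Int) (s : String) (out : Int × List (List String)) :
    Decidable (Spec_solve_simple n s out) := by unfold Spec_solve_simple; infer_instance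

-- ===== CLAIM (what is proved, stated in full; the proofs are below) =====
def Claim_equal_solve_simple : Prop := ∀ (n : Int) (s : String), Dom_solve_simple n s →
  Pre_solve_simple n s → Spec_solve_simple n s (solve_simple n s)

-- ===== LEMMAS AND PROOFS =====

-- the candidate children of t expanded at level i (the j-loop of both programs, as a list)
def pvKids (t : List Char) (i : Int) : List (List Char) :=
  (PySem.List.pyRange 0 (i - 1) 1).filterMap (fun j =>
    (pvDictB.get? (PySem.List.slice t (some j) (some (j + 2)))).map
      (fun v => PySem.List.slice t none (some j) ++ v ++ PySem.List.slice t (some (j + 2)) none))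

lemma pvDict_eq : pvDictA = pvDictB := by decide

-- sequence of DFS explorations at one level
def pvMany (ds : List (List Char)) (lev : Nat) (M : List (PySem.Set (List Char))) :
    List (PySem.Set (List Char)) :=
  ds.foldl (fun m t => pvExplore t lev m) M

-- the members of ds that are new w.r.t. the visited set s, deduplicated, in order
def pvNew (s : PySem.Set (List Char)) (ds : List (List Char)) : List (List Char) :=
  (PySem.Set.ofList ds).filter (fun y => !(PySem.Set.contains s y))

lemma pvFoldl_filterMap {α β σ : Type} (l : List α) (f : α → Option β) (g : σ → β → σ) (i : σ) :
    (l.filterMap f).foldl g i = l.foldl (fun x y => match f y with | some b => g x b | none => x) i := by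
  induction l generalizing i with
  | nil => rfl
  | cons a l ih => cases h : f a <;> simp [h, ih]

lemma pvExplore_unfold (t : List Char) (k : Nat) (M : List (PySem.Set (List Char))) :
    pvExplore t (k + 2) M =
      if PySem.Set.contains (PySem.List.pyGetD M ((k : Int) + 2) PySem.Set.empty) t then M
      else pvMany (pvKids t ((k : Int) + 2)) (k + 1)
        (PySem.List.pySetD M ((k : Int) + 2)
          (PySem.Set.add (PySem.List.pyGetD M ((k : Int) + 2) PySem.Set.empty) t)) := by
  have hc : ((k : Int) + 2) = (((k + 2 : Nat) : Int)) := by push_cast; ring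
  rw [hc]
  conv_lhs => rw [pvExplore]
  unfold pvKids
  have hb : (((k + 2 : Nat) : Int)) - 1 = (k : Int) + 1 := by push_cast; ring
  rw [hb, pvMany, pvFoldl_filterMap]
  split
  · rfl
  · change List.foldl _ _ _ = List.foldl _ _ _
    congr 1
    funext mk j
    cases h : pvDictB.get? (PySem.List.slice t (some j) (some (j + 2))) <;> simp [h]

lemma pvSet_getD_ne {k k' : Nat} (M : List (PySem.Set (List Char))) (v : PySem.Set (List Char))
    (h : k ≠ k') : (M.set k v).getD k' [] = M.getD k' [] := by
  simp [List.getD_eq_getElem?_getD, List.getElem?_set_ne h]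

lemma pvSet_getD_self {k : Nat} (M : List (PySem.Set (List Char))) (v : PySem.Set (List Char))
    (h : k < M.length) : (M.set k v).getD k [] = v := by
  simp [List.getD_eq_getElem?_getD, h]

lemma pvExplore_eq0 (t : List Char) (M : List (PySem.Set (List Char))) :
    pvExplore t 0 M =
      if PySem.Set.contains (M.getD 0 []) t then M
      else M.set 0 (PySem.Set.add (M.getD 0 []) t) := by
  rw [pvExplore]
  rw [show ((0 : Nat) : Int) = ((0 : Nat) : Int) from rfl, PySem.List.pyGetD_natCast,
    PySem.List.pySetD_natCast]
  rfl

lemma pvExplore_eq1 (t : List Char) (M : List (PySem.Set (List Char))) :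
    pvExplore t 1 M =
      if PySem.Set.contains (M.getD 1 []) t then M
      else M.set 1 (PySem.Set.add (M.getD 1 []) t) := by
  rw [pvExplore]
  rw [PySem.List.pyGetD_natCast, PySem.List.pySetD_natCast]
  rfl

lemma pvExplore_eq2 (t : List Char) (k : Nat) (M : List (PySem.Set (List Char))) :
    pvExplore t (k + 2) M =
      if PySem.Set.contains (M.getD (k + 2) []) t then M
      else pvMany (pvKids t ((k : Int) + 2)) (k + 1)
        (M.set (k + 2) (PySem.Set.add (M.getD (k + 2) []) t)) := by
  rw [pvExplore_unfold]
  rw [show ((k : Int) + 2) = (((k + 2 : Nat) : Int)) by push_cast; ring,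
    PySem.List.pyGetD_natCast, PySem.List.pySetD_natCast]
  rfl

lemma pvMany_length (lev : Nat) : ∀ (ds : List (List Char)) (M : List (PySem.Set (List Char))),
    (pvMany ds lev M).length = M.length := by
  induction lev using Nat.strong_induction_on with
  | _ lev IH =>
    intro ds
    induction ds with
    | nil => intro M; rfl
    | cons t ds ih =>
      intro M
      show (pvMany ds lev (pvExplore t lev M)).length = M.length
      rw [ih]
      match lev with
      | 0 => rw [pvExplore_eq0]; split <;> simp
      | 1 => rw [pvExplore_eq1]; split <;> simp
      | (k + 2) =>
        rw [pvExplore_eq2]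
        split
        · rfl
        · rw [IH (k + 1) (by omega), List.length_set]

lemma pvMany_frame (lev : Nat) : ∀ (ds : List (List Char)) (M : List (PySem.Set (List Char)))
    (k : Nat), lev < k → (pvMany ds lev M).getD k [] = M.getD k [] := by
  induction lev using Nat.strong_induction_on with
  | _ lev IH =>
    intro ds
    induction ds with
    | nil => intro M k _; rfl
    | cons t ds ih =>
      intro M k hk
      show (pvMany ds lev (pvExplore t lev M)).getD k [] = M.getD k []
      rw [ih _ _ hk]
      have hne : lev ≠ k := by omega
      match lev with
      | 0 => rw [pvExplore_eq0]; split; · rfl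
             · exact pvSet_getD_ne M _ hne
      | 1 => rw [pvExplore_eq1]; split; · rfl
             · exact pvSet_getD_ne M _ hne
      | (k' + 2) =>
        rw [pvExplore_eq2]
        split
        · rfl
        · rw [IH (k' + 1) (by omega) _ _ _ (by omega)]
          exact pvSet_getD_ne M _ hne

lemma pvMany_set_comm (lev : Nat) : ∀ (ds : List (List Char)) (M : List (PySem.Set (List Char)))
    (k : Nat) (v : PySem.Set (List Char)), lev < k →
    pvMany ds lev (M.set k v) = (pvMany ds lev M).set k v := by
  induction lev using Nat.strong_induction_on with
  | _ lev IH =>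
    intro ds
    induction ds with
    | nil => intro M k v _; rfl
    | cons t ds ih =>
      intro M k v hk
      show pvMany ds lev (pvExplore t lev (M.set k v)) = (pvMany ds lev (pvExplore t lev M)).set k v
      have hne : lev ≠ k := by omega
      have hexp : pvExplore t lev (M.set k v) = (pvExplore t lev M).set k v := by
        match lev with
        | 0 =>
          rw [pvExplore_eq0, pvExplore_eq0, pvSet_getD_ne M v (Ne.symm hne)]
          split
          · rfl
          · rw [List.set_comm _ _ (Ne.symm hne)]
        | 1 =>
          rw [pvExplore_eq1, pvExplore_eq1, pvSet_getD_ne M v (Ne.symm hne)]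
          split
          · rfl
          · rw [List.set_comm _ _ (Ne.symm hne)]
        | (k' + 2) =>
          rw [pvExplore_eq2, pvExplore_eq2, pvSet_getD_ne M v (Ne.symm hne)]
          split
          · rfl
          · rw [List.set_comm _ _ (Ne.symm hne), IH (k' + 1) (by omega) _ _ _ _ (by omega)]
      rw [hexp, ih _ _ _ hk]

lemma pvSet_getD_eq_self (M : List (PySem.Set (List Char))) (k : Nat) (h : k < M.length) :
    M.set k (M.getD k []) = M := by
  rw [List.getD_eq_getElem M [] h]; exact List.set_getElem_self h

lemma pvMany_append (as bs : List (List Char)) (lev : Nat) (M : List (PySem.Set (List Char))) :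
    pvMany (as ++ bs) lev M = pvMany bs lev (pvMany as lev M) :=
  List.foldl_append

lemma pvNew_nil_left (ds : List (List Char)) : pvNew [] ds = PySem.Set.ofList ds := by
  simp [pvNew, PySem.Set.contains]

lemma pvNew_cons_mem (s : PySem.Set (List Char)) (t : List Char) (ds : List (List Char))
    (h : t ∈ s) : pvNew s (t :: ds) = pvNew s ds := by
  unfold pvNew
  rw [PySem.Set.ofList_cons, List.filter_cons]
  have hc : PySem.Set.contains s t = true := (PySem.Set.contains_iff s t).2 h
  simp only [hc, Bool.not_true]
  unfold PySem.Set.discard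
  rw [List.filter_filter]
  apply List.filter_congr
  intro y _
  by_cases hy : y = t
  · subst hy; simp [h]
  · simp [hy]

lemma pvNew_cons_not_mem (s : PySem.Set (List Char)) (t : List Char) (ds : List (List Char))
    (h : t ∉ s) : pvNew s (t :: ds) = t :: pvNew (s.add t) ds := by
  unfold pvNew
  rw [PySem.Set.ofList_cons, List.filter_cons]
  have hc : PySem.Set.contains s t = false := by
    cases hx : PySem.Set.contains s t
    · rfl
    · exact absurd ((PySem.Set.contains_iff s t).1 hx) h
  simp only [hc, Bool.not_false, if_true]
  congr 1
  unfold PySem.Set.discard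
  rw [List.filter_filter]
  apply List.filter_congr
  intro y _
  rw [PySem.Set.add_of_not_mem h]
  by_cases hy : y = t
  · subst hy; simp
  · simp [hy, PySem.Set.contains]

-- DFS main reordering lemma, low levels: a run of explorations at level 0 or 1 only fills
-- that level's visited set.
lemma pvMany_low (lev : Nat) (hlev : lev ≤ 1) : ∀ (ds : List (List Char))
    (M : List (PySem.Set (List Char))), lev < M.length →
    pvMany ds lev M = M.set lev (PySem.Set.update (M.getD lev []) ds) := by
  intro ds
  induction ds with
  | nil =>
    intro M hM
    rw [PySem.Set.update_nil]
    exact (pvSet_getD_eq_self M lev hM).symm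
  | cons t ds ih =>
    intro M hM
    show pvMany ds lev (pvExplore t lev M) = _
    have heq : pvExplore t lev M =
        if PySem.Set.contains (M.getD lev []) t then M
        else M.set lev (PySem.Set.add (M.getD lev []) t) := by
      match lev, hlev with
      | 0, _ => exact pvExplore_eq0 t M
      | 1, _ => exact pvExplore_eq1 t M
    rw [heq]
    by_cases hmem : t ∈ M.getD lev []
    · rw [if_pos ((PySem.Set.contains_iff _ t).2 hmem)]
      rw [ih M hM, PySem.Set.update_cons, PySem.Set.add_of_mem hmem]
    · rw [if_neg (by rw [PySem.Set.contains_iff]; exact hmem)]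
      rw [ih _ (by rw [List.length_set]; exact hM)]
      rw [pvSet_getD_self M _ hM, List.set_set, PySem.Set.update_cons]

-- DFS main reordering lemma, high levels: the insertions at level k+2 can all be floated in
-- front of the recursive explorations of the fresh elements' children at level k+1.
lemma pvMany_high (k : Nat) : ∀ (ds : List (List Char))
    (M : List (PySem.Set (List Char))), k + 2 < M.length →
    pvMany ds (k + 2) M =
      pvMany ((pvNew (M.getD (k + 2) []) ds).flatMap (fun t => pvKids t ((k : Int) + 2)))
        (k + 1) (M.set (k + 2) (PySem.Set.update (M.getD (k + 2) []) ds)) := by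
  intro ds
  induction ds with
  | nil =>
    intro M hM
    show M = _
    rw [pvNew, PySem.Set.update_nil]
    show M = pvMany [] (k + 1) _
    show M = M.set (k + 2) (M.getD (k + 2) [])
    exact (pvSet_getD_eq_self M _ hM).symm
  | cons t ds ih =>
    intro M hM
    show pvMany ds (k + 2) (pvExplore t (k + 2) M) = _
    rw [pvExplore_eq2]
    by_cases hmem : t ∈ M.getD (k + 2) []
    · rw [if_pos ((PySem.Set.contains_iff _ t).2 hmem)]
      rw [ih M hM, pvNew_cons_mem _ _ _ hmem, PySem.Set.update_cons, PySem.Set.add_of_mem hmem]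
    · rw [if_neg (by rw [PySem.Set.contains_iff]; exact hmem)]
      set s := M.getD (k + 2) [] with hs
      set cs := pvKids t ((k : Int) + 2) with hcs
      set M1 := M.set (k + 2) (PySem.Set.add s t) with hM1
      have hN : (pvMany cs (k + 1) M1).length = M.length := by
        rw [pvMany_length, hM1, List.length_set]
      rw [ih _ (by rw [hN]; exact hM)]
      have hgd : (pvMany cs (k + 1) M1).getD (k + 2) [] = PySem.Set.add s t := by
        rw [pvMany_frame _ _ _ _ (by omega), hM1,
          pvSet_getD_self M _ (by omega)]
      rw [hgd]
      rw [← pvMany_set_comm (k + 1) cs M1 (k + 2) _ (by omega)]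
      rw [hM1, List.set_set]
      rw [← pvMany_append]
      rw [pvNew_cons_not_mem _ _ _ hmem, PySem.Set.update_cons]
      rw [List.flatMap_cons]

-- the cascade of pending lists: pvPendAux s n d = the candidates first inserted at level n-d
def pvPendAux (sL : List Char) (n : Nat) : Nat → List (List Char)
  | 0 => [sL]
  | d + 1 => (PySem.Set.ofList (pvPendAux sL n d)).flatMap
      (fun t => pvKids t ((n : Int) - (d : Int)))

-- state with levels ≥ i holding their final sets, the levels below i still empty
def pvStateAt (sL : List Char) (n : Nat) (i : Nat) : List (PySem.Set (List Char)) :=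
  (List.range (n + 1)).map (fun k => if i ≤ k then PySem.Set.ofList (pvPendAux sL n (n - k)) else [])

lemma pvStateAt_length (sL : List Char) (n i : Nat) : (pvStateAt sL n i).length = n + 1 := by
  simp [pvStateAt]

lemma pvStateAt_getD (sL : List Char) (n i k : Nat) (hk : k ≤ n) :
    (pvStateAt sL n i).getD k [] =
      if i ≤ k then PySem.Set.ofList (pvPendAux sL n (n - k)) else [] := by
  unfold pvStateAt
  rw [List.getD_eq_getElem?_getD, List.getElem?_map]
  rw [List.getElem?_range (by omega)]
  rfl

lemma pvStateAt_set (sL : List Char) (n i : Nat) (_hi : i ≤ n) :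
    (pvStateAt sL n (i + 1)).set i (PySem.Set.ofList (pvPendAux sL n (n - i)))
      = pvStateAt sL n i := by
  apply List.ext_getElem
  · simp [pvStateAt]
  · intro k h1 h2
    have hk : k ≤ n := by rw [pvStateAt_length] at h2; omega
    rw [List.getElem_set]
    unfold pvStateAt
    simp only [List.getElem_map, List.getElem_range]
    by_cases hik : i = k
    · subst hik; simp
    · rw [if_neg hik]
      by_cases h3 : i ≤ k
      · rw [if_pos (by omega), if_pos h3]
      · rw [if_neg (by omega), if_neg h3]

-- the body of A's outer loop, exactly the lambda of the port of A
def pvABody (mk : List (PySem.Set (List Char))) (i : Int) : List (PySem.Set (List Char)) :=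
  (PySem.List.pyGetD mk i PySem.Set.empty).foldl (fun mk t =>
    (PySem.List.pyRange 0 (i - 1) 1).foldl (fun mk j =>
      let cut := PySem.List.slice t (some j) (some (j + 2))
      match pvDictA.get? cut with
      | some v => PySem.List.pySetD mk (i - 1)
          (PySem.Set.add (PySem.List.pyGetD mk (i - 1) PySem.Set.empty)
            (PySem.List.slice t none (some j) ++ v ++ PySem.List.slice t (some (j + 2)) none))
      | none => mk) mk) mk

def pvMake0 (n : Int) : List (PySem.Set (List Char)) :=
  (List.range (n + 1).toNat).map (fun _ => PySem.Set.empty)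

def pvMake1 (n : Int) (s : String) : List (PySem.Set (List Char)) :=
  PySem.List.pySetD (pvMake0 n) n
    (PySem.Set.add (PySem.List.pyGetD (pvMake0 n) n PySem.Set.empty) s.toList)

def pvAMake2 (n : Int) (s : String) : List (PySem.Set (List Char)) :=
  (PySem.List.pyRange n 1 (-1)).foldl pvABody (pvMake1 n s)

def pvBMake (n : Int) (s : String) : List (PySem.Set (List Char)) :=
  pvExplore s.toList n.toNat (pvMake0 n)

lemma solve_simple_eq (n : Int) (s : String) :
    solve_simple n s =
      ((PySem.List.pyRange 1 (n + 1) 1).foldl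
        (fun a i => a + ((PySem.List.pyGetD (pvAMake2 n s) i PySem.Set.empty).length : Int)) 0,
       (pvAMake2 n s).map (fun st => st.map String.ofList)) := rfl

lemma solve_simple_alt_eq (n : Int) (s : String) :
    solve_simple_alt n s =
      (((PySem.List.pyRange 1 (n + 1) 1).map
          (fun i => ((PySem.List.pyGetD (pvBMake n s) i PySem.Set.empty).length : Int))).sum,
       (pvBMake n s).map (fun st => st.map String.ofList)) := rfl

-- the fold of plain insertions at one fixed index is one Set.update
lemma pvFold_add (p : Nat) : ∀ (xs : List (List Char)) (M : List (PySem.Set (List Char))),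
    p < M.length →
    xs.foldl (fun mk u => mk.set p (PySem.Set.add (mk.getD p []) u)) M
      = M.set p (PySem.Set.update (M.getD p []) xs) := by
  intro xs
  induction xs with
  | nil =>
    intro M hM
    rw [List.foldl_nil, PySem.Set.update_nil]
    exact (pvSet_getD_eq_self M p hM).symm
  | cons u xs ih =>
    intro M hM
    rw [List.foldl_cons, ih _ (by rw [List.length_set]; exact hM)]
    rw [pvSet_getD_self M _ hM, List.set_set, PySem.Set.update_cons]

-- A's inner j-loop over one t is the insertion fold over pvKids t i
lemma pvAInner (t : List Char) (i : Int) (mk : List (PySem.Set (List Char))) :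
    (PySem.List.pyRange 0 (i - 1) 1).foldl (fun mk j =>
      let cut := PySem.List.slice t (some j) (some (j + 2))
      match pvDictA.get? cut with
      | some v => PySem.List.pySetD mk (i - 1)
          (PySem.Set.add (PySem.List.pyGetD mk (i - 1) PySem.Set.empty)
            (PySem.List.slice t none (some j) ++ v ++ PySem.List.slice t (some (j + 2)) none))
      | none => mk) mk
    = (pvKids t i).foldl (fun mk u =>
        PySem.List.pySetD mk (i - 1)
          (PySem.Set.add (PySem.List.pyGetD mk (i - 1) PySem.Set.empty) u)) mk := by
  rw [pvKids, pvFoldl_filterMap, pvDict_eq]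
  congr 1
  funext mk j
  cases h : pvDictB.get? (PySem.List.slice t (some j) (some (j + 2))) <;> simp [h]

lemma pvSetEmpty_eq_nil : (PySem.Set.empty : PySem.Set (List Char)) = [] := rfl

lemma pvAStep (sL : List Char) (n iN : Nat) (h2 : 2 ≤ iN) (hn : iN ≤ n) :
    pvABody (pvStateAt sL n iN) (iN : Int) = pvStateAt sL n (iN - 1) := by
  unfold pvABody
  simp only [pvAInner]
  rw [PySem.List.pyGetD_natCast, pvSetEmpty_eq_nil]
  rw [pvStateAt_getD sL n iN iN (by omega), if_pos (le_refl iN)]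
  rw [← List.foldl_flatMap]
  have hc1 : (iN : Int) - 1 = ((iN - 1 : Nat) : Int) := by push_cast [Nat.cast_sub (by omega : 1 ≤ iN)]; ring
  rw [hc1]
  simp only [PySem.List.pySetD_natCast, PySem.List.pyGetD_natCast]
  rw [pvFold_add (iN - 1) _ _ (by rw [pvStateAt_length]; omega)]
  rw [pvStateAt_getD sL n iN (iN - 1) (by omega), if_neg (by omega)]
  rw [PySem.Set.update_nil_left]
  have hP : pvPendAux sL n (n - iN + 1)
      = (PySem.Set.ofList (pvPendAux sL n (n - iN))).flatMap (fun t => pvKids t ((iN : Nat) : Int)) := by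
    rw [pvPendAux]
    have harg : (n : Int) - ((n - iN : Nat) : Int) = ((iN : Nat) : Int) := by
      rw [Nat.cast_sub hn]; ring
    rw [harg]
  rw [← hP]
  have := pvStateAt_set sL n (iN - 1) (by omega)
  rw [show iN - 1 + 1 = iN by omega, show n - (iN - 1) = n - iN + 1 by omega] at this
  exact this

lemma pvADown (sL : List Char) (n : Nat) : ∀ iN : Nat, 1 ≤ iN → iN ≤ n →
    (PySem.List.pyRange (iN : Int) 1 (-1)).foldl pvABody (pvStateAt sL n iN)
      = pvStateAt sL n 1 := by
  intro iN
  induction iN with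
  | zero => omega
  | succ m ih =>
    intro h1 hn
    match m, ih with
    | 0, _ =>
      rw [PySem.List.pyRange_neg_one_eq_nil (by norm_num)]
      rfl
    | (m' + 1), ih =>
      rw [PySem.List.pyRange_neg_one_cons (by exact_mod_cast (by omega : 1 < m' + 2))]
      rw [List.foldl_cons]
      rw [pvAStep sL n (m' + 2) (by omega) hn]
      have : ((m' + 2 : Nat) : Int) - 1 = ((m' + 1 : Nat) : Int) := by push_cast; ring
      rw [this]
      have : (m' + 2) - 1 = m' + 1 := rfl
      rw [this]
      exact ih (by omega) (by omega)

lemma pvBDown (sL : List Char) (n : Nat) : ∀ iN : Nat, 1 ≤ iN → iN ≤ n →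
    pvMany (pvPendAux sL n (n - iN)) iN (pvStateAt sL n (iN + 1)) = pvStateAt sL n 1 := by
  intro iN
  induction iN with
  | zero => omega
  | succ m ih =>
    intro h1 hn
    match m, ih with
    | 0, _ =>
      rw [pvMany_low 1 (by omega) _ _ (by rw [pvStateAt_length]; omega)]
      rw [pvStateAt_getD sL n 2 1 (by omega), if_neg (by omega)]
      rw [PySem.Set.update_nil_left]
      exact pvStateAt_set sL n 1 (by omega)
    | (m' + 1), ih =>
      rw [pvMany_high m' _ _ (by rw [pvStateAt_length]; omega)]
      rw [pvStateAt_getD sL n (m' + 3) (m' + 2) (by omega), if_neg (by omega)]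
      rw [pvNew_nil_left, PySem.Set.update_nil_left]
      rw [pvStateAt_set sL n (m' + 2) (by omega)]
      have hP : pvPendAux sL n (n - (m' + 1))
          = (PySem.Set.ofList (pvPendAux sL n (n - (m' + 2)))).flatMap
              (fun t => pvKids t ((m' : Int) + 2)) := by
        have h1' : n - (m' + 1) = (n - (m' + 2)) + 1 := by omega
        rw [h1', pvPendAux]
        have harg : (n : Int) - ((n - (m' + 2) : Nat) : Int) = (m' : Int) + 2 := by
          rw [Nat.cast_sub (by omega)]; push_cast; ring
        rw [harg]
      rw [← hP]
      exact ih (by omega) (by omega)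

-- ===== VERDICT (by name: the statement is the Claim_ definition above) =====
lemma pvMake0_eq (N : Nat) (sL : List Char) :
    pvMake0 (N : Int) = pvStateAt sL N (N + 1) := by
  unfold pvMake0 pvStateAt
  rw [show ((N : Int) + 1).toNat = N + 1 by omega]
  apply List.map_congr_left
  intro k hk
  rw [List.mem_range] at hk
  rw [if_neg (by omega)]
  rfl

lemma pvMake1_eq (N : Nat) (s : String) : pvMake1 (N : Int) s = pvStateAt s.toList N N := by
  unfold pvMake1
  rw [PySem.List.pySetD_natCast, PySem.List.pyGetD_natCast, pvSetEmpty_eq_nil]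
  rw [pvMake0_eq N s.toList]
  rw [pvStateAt_getD s.toList N (N + 1) N (by omega), if_neg (by omega)]
  have hadd : PySem.Set.add [] s.toList = PySem.Set.ofList (pvPendAux s.toList N (N - N)) := by
    rw [show N - N = 0 by omega, pvPendAux]
    simp [PySem.Set.ofList_cons, PySem.Set.discard, PySem.Set.add]
  rw [hadd]
  exact pvStateAt_set s.toList N N (le_refl N)

lemma pvMake_eq (N : Nat) (s : String) : pvAMake2 (N : Int) s = pvBMake (N : Int) s := by
  have hB0 : pvBMake (N : Int) s = pvExplore s.toList N (pvStateAt s.toList N (N + 1)) := by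
    unfold pvBMake
    rw [Int.toNat_natCast, pvMake0_eq N s.toList]
  match N with
  | 0 =>
    unfold pvAMake2
    rw [PySem.List.pyRange_neg_one_eq_nil (by norm_num), List.foldl_nil, pvMake1_eq, hB0,
      pvExplore_eq0]
    rw [pvStateAt_getD s.toList 0 1 0 (by omega), if_neg (show ¬ (1 ≤ 0) by omega)]
    rw [if_neg (show ¬ (PySem.Set.contains ([] : PySem.Set (List Char)) s.toList = true) by
      simp [PySem.Set.contains])]
    have hadd : PySem.Set.add [] s.toList = PySem.Set.ofList (pvPendAux s.toList 0 0) := by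
      rw [pvPendAux]; simp [PySem.Set.ofList_cons, PySem.Set.discard, PySem.Set.add]
    rw [hadd]
    exact (pvStateAt_set s.toList 0 0 (le_refl 0)).symm
  | (M + 1) =>
    unfold pvAMake2
    rw [pvMake1_eq, pvADown s.toList (M + 1) (M + 1) (by omega) (le_refl _), hB0]
    have hx : pvExplore s.toList (M + 1) (pvStateAt s.toList (M + 1) (M + 2))
        = pvMany (pvPendAux s.toList (M + 1) ((M + 1) - (M + 1))) (M + 1)
            (pvStateAt s.toList (M + 1) ((M + 1) + 1)) := by
      rw [show (M + 1) - (M + 1) = 0 by omega, pvPendAux]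
      rfl
    rw [hx, pvBDown s.toList (M + 1) (M + 1) (by omega) (le_refl _)]

theorem solve_simple_spec : Claim_equal_solve_simple := by
  intro n s _ hpre
  unfold Spec_solve_simple
  obtain ⟨N, rfl⟩ : ∃ N : Nat, n = (N : Int) := ⟨n.toNat, (Int.toNat_of_nonneg hpre).symm⟩
  rw [solve_simple_eq, solve_simple_alt_eq, pvMake_eq, PySem.List.foldl_add, zero_add]
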